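-- pv_equiv track=rewrite | github.com/SlamDunxxx/vsbotfresh | src/vs_overseer/objective_planner.py | _sanitize_token
-- ===== SOURCE A (Python) =====
-- def _sanitize_token(raw: str) -> str:
--     out = []
--     for ch in str(raw).strip().lower():
--         if ch.isalnum():
--             out.append(ch)
--         elif ch in {".", "-"}:
--             out.append("_")
--         else:
--             out.append("_")
--     compact = "".join(out).strip("_")
--     while "__" in compact:
--         compact = compact.replace("__", "_")
--     return compact or "goal"
-- ===== SOURCE B (Python) =====
-- def _sanitize_token(raw: str) -> str:
--     s = str(raw).strip().lower()
--     runs = []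
--     cur = []
--     for ch in s:
--         if ch.isalnum():
--             cur.append(ch)
--         elif cur:
--             runs.append("".join(cur))
--             cur = []
--     if cur:
--         runs.append("".join(cur))
--     return "_".join(runs) or "goal"
-- ===== Notes on version B (the rewrite author's own statement) =====
-- stated objective: simpler
-- what changed: B does one pass that groups maximal alnum runs and joins them with single underscores, instead of A's emit-a-char-per-char list, edge-underscore stripping, and repeated double-underscore replacement until a fixpoint.
import Mathlib
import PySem

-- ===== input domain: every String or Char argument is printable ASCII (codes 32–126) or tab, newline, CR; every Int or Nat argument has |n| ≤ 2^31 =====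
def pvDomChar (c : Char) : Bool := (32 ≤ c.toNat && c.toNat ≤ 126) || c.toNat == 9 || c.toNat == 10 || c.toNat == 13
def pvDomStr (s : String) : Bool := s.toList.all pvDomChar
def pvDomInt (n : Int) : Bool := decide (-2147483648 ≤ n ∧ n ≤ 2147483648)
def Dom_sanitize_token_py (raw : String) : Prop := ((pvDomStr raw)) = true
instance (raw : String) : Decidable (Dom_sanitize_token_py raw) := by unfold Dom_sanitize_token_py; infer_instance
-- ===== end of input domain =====

-- B replaces A's expand-then-strip-then-fixpoint-collapse with a single pass that groups
-- maximal alnum runs and joins them with single underscores (simpler: no rewrite loop).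

-- ===== PORT A =====
-- helper needed by port A's termination: `compact.replace("__","_")` as a plain recursion
def pvRep : List Char → List Char
  | [] => []
  | [c] => [c]
  | c :: d :: t => if c = '_' ∧ d = '_' then '_' :: pvRep t else c :: pvRep (d :: t)

theorem pvRep_go (fuel : Nat) : ∀ (l acc : List Char), l.length ≤ fuel →
    PySem.Chars.replace.go ['_', '_'] ['_'] fuel l acc = acc.reverse ++ pvRep l := by
  induction fuel with
  | zero =>
    intro l acc h
    have : l = [] := List.eq_nil_of_length_eq_zero (Nat.le_zero.mp h)
    subst this; simp [PySem.Chars.replace.go, pvRep]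
  | succ n ih =>
    intro l acc h
    match l with
    | [] => simp [PySem.Chars.replace.go, pvRep]
    | c :: t =>
      simp only [PySem.Chars.replace.go]
      by_cases hp : List.isPrefixOf ['_', '_'] (c :: t)
      · match t with
        | [] => simp [List.isPrefixOf] at hp
        | d :: u =>
          have hc : c = '_' ∧ d = '_' := by
            have := hp; simp [List.isPrefixOf] at this
            exact ⟨this.1.symm, this.2.symm⟩
          simp only [hp, if_true, List.length_cons, List.drop_succ_cons,
            List.reverse_singleton, List.singleton_append]
          rw [show List.drop ([] : List Char).length u = u from rfl,
            ih u ('_' :: acc) (by simp at h ⊢; omega)]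
          simp [pvRep, hc.1, hc.2]
      · simp only [hp]
        rw [ih t (c :: acc) (by simpa using Nat.lt_succ_iff.mp (by simpa using h))]
        match t with
        | [] => simp [pvRep]
        | d :: u =>
          have : ¬ (c = '_' ∧ d = '_') := by
            intro hcd; exact hp (by simp [List.isPrefixOf, hcd.1, hcd.2])
          simp [pvRep, this]

theorem pvReplace_eq (l : List Char) :
    PySem.Chars.replace l ['_', '_'] ['_'] = pvRep l := by
  simp [PySem.Chars.replace]
  exact pvRep_go l.length l [] le_rfl

theorem pvRep_length_le : ∀ l : List Char, (pvRep l).length ≤ l.length := by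
  intro l
  induction l using pvRep.induct with
  | case1 => simp [pvRep]
  | case2 c => simp [pvRep]
  | case3 c d t h ih => simp [pvRep, h]; omega
  | case4 c d t h ih => simp [pvRep, h] at ih ⊢; omega

theorem pvRep_length_lt : ∀ l : List Char, ['_', '_'] <:+: l → (pvRep l).length < l.length := by
  intro l
  induction l using pvRep.induct with
  | case1 => intro h; exact absurd (List.eq_nil_of_infix_nil h) (by simp)
  | case2 c => intro h; have := h.length_le; simp at this
  | case3 c d t h ih =>
    intro _; simp [pvRep, h]
    have := pvRep_length_le t; omega
  | case4 c d t h ih =>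
    intro hinf
    rcases List.infix_cons_iff.mp hinf with hpre | hinf'
    · rcases hpre with ⟨r, hr⟩
      simp at hr
      exact absurd ⟨hr.1.symm, hr.2.1.symm⟩ h
    · simp only [pvRep, if_neg h, List.length_cons]
      exact Nat.succ_lt_succ (ih hinf')

def sanitize_token_py_collapse (compact : List Char) : List Char :=
  if PySem.Chars.isIn ['_', '_'] compact then
    sanitize_token_py_collapse (PySem.Chars.replace compact ['_', '_'] ['_'])
  else compact
termination_by compact.length
decreasing_by
  rw [pvReplace_eq]
  exact pvRep_length_lt _ ((PySem.Chars.isIn_iff_infix _ _).mp (by assumption))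

def sanitize_token_py (raw : String) : String :=
  let out : List (List Char) :=
    (PySem.Chars.lower (PySem.Chars.strip raw.toList)).foldl
      (fun out ch =>
        if PySem.Chars.isalnum ch then out ++ [[ch]]
        else if ch = '.' ∨ ch = '-' then out ++ [['_']]
        else out ++ [['_']]) []
  let compact := PySem.Chars.stripChars (PySem.Chars.join [] out) ['_']
  let compact := sanitize_token_py_collapse compact
  if compact = [] then "goal" else String.ofList compact

-- ===== PORT B =====
def sanitize_token_py_alt (raw : String) : String :=
  let s := PySem.Chars.lower (PySem.Chars.strip raw.toList)
  let rc : List (List Char) × List Char :=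
    s.foldl
      (fun rc ch =>
        if PySem.Chars.isalnum ch then (rc.1, rc.2 ++ [ch])
        else if rc.2 ≠ [] then (rc.1 ++ [rc.2], []) else rc) ([], [])
  let runs := if rc.2 ≠ [] then rc.1 ++ [rc.2] else rc.1
  let r := PySem.Chars.join ['_'] runs
  if r = [] then "goal" else String.ofList r

-- ===== PRECONDITION & SPEC =====
def Spec_sanitize_token_py (raw : String) (out : String) : Prop := out = sanitize_token_py_alt raw
instance (raw : String) (out : String) : Decidable (Spec_sanitize_token_py raw out) := by unfold Spec_sanitize_token_py; infer_instance

-- ===== CLAIM (what is proved, stated in full; the proofs are below) =====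
def Claim_equal_sanitize_token_py : Prop := ∀ (raw : String), Dom_sanitize_token_py raw → Spec_sanitize_token_py raw (sanitize_token_py raw)

-- ===== LEMMAS AND PROOFS =====

-- the character A's loop effectively emits for ch
def pvF (ch : Char) : Char := if PySem.Chars.isalnum ch then ch else '_'

-- maximal runs of non-'_' characters, carried run `cur` included
def pvRuns : List Char → List Char → List (List Char)
  | cur, [] => if cur = [] then [] else [cur]
  | cur, c :: t =>
    if c = '_' then (if cur = [] then [] else [cur]) ++ pvRuns [] t
    else pvRuns (cur ++ [c]) t

-- maximal runs of alnum characters (what B's fold accumulates)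
def pvRunsA : List Char → List Char → List (List Char)
  | cur, [] => if cur = [] then [] else [cur]
  | cur, c :: t =>
    if PySem.Chars.isalnum c then pvRunsA (cur ++ [c]) t
    else (if cur = [] then [] else [cur]) ++ pvRunsA [] t

-- collapse every maximal run of '_' to a single '_'
def pvSquash : List Char → List Char
  | [] => []
  | c :: t =>
    if c = '_' then '_' :: pvSquash (t.dropWhile (· = '_'))
    else c :: pvSquash t
termination_by l => l.length
decreasing_by
  · exact Nat.lt_succ_of_le (List.length_dropWhile_le _ _)
  · simp

theorem pvSquash_nil : pvSquash [] = [] := by simp [pvSquash]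

theorem pvSquash_cons (c : Char) (t : List Char) :
    pvSquash (c :: t) =
      (if c = '_' then '_' :: pvSquash (t.dropWhile (· = '_')) else c :: pvSquash t) := by
  rw [pvSquash]

theorem pvRep_cons (d : Char) (t : List Char) : ∃ r, pvRep (d :: t) = d :: r := by
  match t with
  | [] => exact ⟨[], rfl⟩
  | e :: u =>
    by_cases h : d = '_' ∧ e = '_'
    · exact ⟨pvRep u, by simp [pvRep, h]⟩
    · exact ⟨pvRep (e :: u), by simp [pvRep, h]⟩

theorem pvSquash_rep_aux : ∀ n (l : List Char), l.length ≤ n →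
    pvSquash (pvRep l) = pvSquash l ∧
      pvSquash ((pvRep l).dropWhile (· = '_')) = pvSquash (l.dropWhile (· = '_')) := by
  intro n
  induction n with
  | zero =>
    intro l h
    have : l = [] := List.eq_nil_of_length_eq_zero (Nat.le_zero.mp h)
    subst this; exact ⟨rfl, rfl⟩
  | succ n ih =>
    intro l h
    match l with
    | [] => exact ⟨rfl, rfl⟩
    | [c] => exact ⟨rfl, rfl⟩
    | c :: d :: t =>
      by_cases hcd : c = '_' ∧ d = '_'
      · obtain ⟨hc, hd⟩ := hcd
        subst hc; subst hd
        have ht := ih t (by simp at h ⊢; omega)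
        have e1 : pvRep ('_' :: '_' :: t) = '_' :: pvRep t := by simp [pvRep]
        constructor
        · rw [e1]; simp [pvSquash, ht.2]
        · rw [e1]; simp [ht.2]
      · have hdt := ih (d :: t) (by simp at h ⊢; omega)
        have e1 : pvRep (c :: d :: t) = c :: pvRep (d :: t) := by simp [pvRep, hcd]
        by_cases hc : c = '_'
        · subst hc
          have hd : d ≠ '_' := fun hd => hcd ⟨rfl, hd⟩
          obtain ⟨r, hr⟩ := pvRep_cons d t
          have hdw : (pvRep (d :: t)).dropWhile (· = '_') = pvRep (d :: t) := by
            rw [hr]; simp [hd]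
          constructor
          · rw [e1]; simp [pvSquash, hd, hdw, hdt.1]
          · rw [e1]; simp [hd, hdw, hdt.1]
        · have h1 : pvSquash (pvRep (c :: d :: t)) = pvSquash (c :: d :: t) := by
            rw [e1]; simp [pvSquash, hc, hdt.1]
          refine ⟨h1, ?_⟩
          rw [e1]
          simp [hc, pvSquash, hdt.1]

theorem pvSquash_rep (l : List Char) : pvSquash (pvRep l) = pvSquash l :=
  (pvSquash_rep_aux l.length l le_rfl).1

theorem pvSquash_nodouble : ∀ l : List Char, ¬ ['_', '_'] <:+: l → pvSquash l = l := by
  intro l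
  induction l with
  | nil => intro _; exact pvSquash_nil
  | cons c t ih =>
    intro hni
    have hti : ¬ ['_', '_'] <:+: t := fun h => hni (List.infix_cons h)
    by_cases hc : c = '_'
    · subst hc
      have hdw : t.dropWhile (· = '_') = t := by
        match t with
        | [] => rfl
        | e :: u =>
          have he : e ≠ '_' := by
            intro he; subst he
            exact hni ⟨[], u, rfl⟩
          simp [he]
      rw [pvSquash_cons, if_pos rfl, hdw, ih hti]
    · rw [pvSquash_cons, if_neg hc, ih hti]

theorem pvCollapse_eq_squash : ∀ n (l : List Char), l.length ≤ n →
    sanitize_token_py_collapse l = pvSquash l := by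
  intro n
  induction n with
  | zero =>
    intro l h
    have : l = [] := List.eq_nil_of_length_eq_zero (Nat.le_zero.mp h)
    subst this
    rw [sanitize_token_py_collapse]
    simp [PySem.Chars.isIn, PySem.Chars.find, PySem.Chars.find.go, pvSquash_nil]
  | succ n ih =>
    intro l h
    rw [sanitize_token_py_collapse]
    by_cases hin : PySem.Chars.isIn ['_', '_'] l
    · rw [if_pos hin, pvReplace_eq]
      have hlt := pvRep_length_lt l ((PySem.Chars.isIn_iff_infix _ _).mp hin)
      rw [ih (pvRep l) (by omega)]
      exact pvSquash_rep l
    · rw [if_neg hin]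
      exact (pvSquash_nodouble l ((PySem.Chars.isIn_eq_false_iff _ _).mp
        (Bool.not_eq_true _ ▸ hin))).symm

-- ===== A-side characterisation =====
theorem pvFoldA (s : List Char) : ∀ out0 : List (List Char),
    s.foldl
      (fun out ch =>
        if PySem.Chars.isalnum ch then out ++ [[ch]]
        else if ch = '.' ∨ ch = '-' then out ++ [['_']]
        else out ++ [['_']]) out0 = out0 ++ s.map (fun ch => [pvF ch]) := by
  induction s with
  | nil => intro out0; simp
  | cons c t ih =>
    intro out0
    simp only [List.foldl_cons, List.map_cons, ih]
    have : (if PySem.Chars.isalnum c then out0 ++ [[c]]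
        else if c = '.' ∨ c = '-' then out0 ++ [['_']]
        else out0 ++ [['_']]) = out0 ++ [[pvF c]] := by
      unfold pvF; split_ifs <;> rfl
    rw [this, List.append_assoc]
    rfl

-- ===== B-side characterisation =====
theorem pvFoldB (s : List Char) : ∀ (R : List (List Char)) (cur : List Char),
    (fun rc : List (List Char) × List Char =>
        if rc.2 ≠ [] then rc.1 ++ [rc.2] else rc.1)
      (s.foldl
        (fun rc ch =>
          if PySem.Chars.isalnum ch then (rc.1, rc.2 ++ [ch])
          else if rc.2 ≠ [] then (rc.1 ++ [rc.2], []) else rc) (R, cur))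
      = R ++ pvRunsA cur s := by
  induction s with
  | nil =>
    intro R cur
    by_cases hc : cur = [] <;> simp [pvRunsA, hc]
  | cons c t ih =>
    intro R cur
    rw [List.foldl_cons]
    by_cases ha : PySem.Chars.isalnum c
    · rw [show (if PySem.Chars.isalnum c = true then ((R, cur).1, (R, cur).2 ++ [c])
          else if (R, cur).2 ≠ [] then ((R, cur).1 ++ [(R, cur).2], []) else (R, cur))
          = (R, cur ++ [c]) from by simp [ha]]
      rw [ih R (cur ++ [c])]
      simp [pvRunsA, ha]
    · by_cases hc : cur = []
      · subst hc
        rw [show (if PySem.Chars.isalnum c = true then ((R, ([] : List Char)).1, (R, ([] : List Char)).2 ++ [c])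
            else if (R, ([] : List Char)).2 ≠ [] then ((R, ([] : List Char)).1 ++ [(R, ([] : List Char)).2], [])
            else (R, ([] : List Char))) = (R, ([] : List Char)) from by simp [ha]]
        rw [ih R []]
        simp [pvRunsA, ha]
      · rw [show (if PySem.Chars.isalnum c = true then ((R, cur).1, (R, cur).2 ++ [c])
            else if (R, cur).2 ≠ [] then ((R, cur).1 ++ [(R, cur).2], []) else (R, cur))
            = (R ++ [cur], ([] : List Char)) from by simp [ha, hc]]
        rw [ih (R ++ [cur]) []]
        simp [pvRunsA, ha, hc]

theorem pvIsalnum_ne_underscore (c : Char) (h : PySem.Chars.isalnum c) : c ≠ '_' := by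
  intro hc; subst hc; exact absurd h (by decide)

theorem pvRunsA_map : ∀ (s cur : List Char), pvRunsA cur s = pvRuns cur (s.map pvF) := by
  intro s
  induction s with
  | nil => intro cur; rfl
  | cons c t ih =>
    intro cur
    by_cases ha : PySem.Chars.isalnum c
    · have hne := pvIsalnum_ne_underscore c ha
      simp [pvRunsA, ha, List.map_cons, pvRuns, pvF, hne, ih (cur ++ [c])]
    · simp [pvRunsA, ha, List.map_cons, pvRuns, pvF, ih []]

-- ===== runs ignore leading/trailing underscores =====
theorem pvRuns_all_underscore : ∀ (ws : List Char), (∀ c ∈ ws, c = '_') →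
    ∀ cur, pvRuns cur ws = if cur = [] then [] else [cur] := by
  intro ws
  induction ws with
  | nil => intro _ cur; rfl
  | cons w ws ih =>
    intro hall cur
    have hw : w = '_' := hall w (by simp)
    have hws : ∀ c ∈ ws, c = '_' := fun c hc => hall c (by simp [hc])
    simp [pvRuns, hw, ih hws []]

theorem pvRuns_append_underscore : ∀ (x ws : List Char), (∀ c ∈ ws, c = '_') →
    ∀ cur, pvRuns cur (x ++ ws) = pvRuns cur x := by
  intro x
  induction x with
  | nil =>
    intro ws hws cur
    simp only [List.nil_append]
    rw [pvRuns_all_underscore ws hws cur]; rfl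
  | cons c t ih =>
    intro ws hws cur
    by_cases hc : c = '_'
    · simp only [List.cons_append, pvRuns, if_pos hc, ih ws hws []]
    · simp only [List.cons_append, pvRuns, if_neg hc, ih ws hws (cur ++ [c])]

theorem pvRuns_dropWhile : ∀ m : List Char,
    pvRuns [] m = pvRuns [] (m.dropWhile (· = '_')) := by
  intro m
  induction m with
  | nil => rfl
  | cons c t ih =>
    by_cases hc : c = '_'
    · simp only [pvRuns, if_pos hc, List.dropWhile_cons, decide_eq_true_eq]
      simpa [hc] using ih
    · simp [hc]

theorem pvRuns_ne_nil : ∀ (t cur : List Char),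
    (cur ≠ [] ∨ ∃ c ∈ t, c ≠ '_') → pvRuns cur t ≠ [] := by
  intro t
  induction t with
  | nil =>
    intro cur h
    rcases h with h | ⟨c, hc, _⟩
    · simp [pvRuns, h]
    · simp at hc
  | cons c t ih =>
    intro cur h
    by_cases hc : c = '_'
    · subst hc
      by_cases hcur : cur = []
      · subst hcur
        have : ∃ x ∈ t, x ≠ '_' := by
          rcases h with h | ⟨x, hx, hxe⟩
          · exact absurd rfl h
          · rcases List.mem_cons.mp hx with rfl | hxt
            · exact absurd rfl hxe
            · exact ⟨x, hxt, hxe⟩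
        simpa [pvRuns] using ih [] (Or.inr this)
      · simp [pvRuns, hcur]
    · simp only [pvRuns, if_neg hc]
      exact ih (cur ++ [c]) (Or.inl (by simp))

theorem pvJoin_cons (x : List Char) (xs : List (List Char)) (h : xs ≠ []) :
    PySem.Chars.join ['_'] (x :: xs) = x ++ '_' :: PySem.Chars.join ['_'] xs := by
  match xs with
  | y :: ys => simp [PySem.Chars.join, List.intercalate]

-- the heart: join-with-'_' of the runs = squash of the trimmed string
theorem pvKM : ∀ n (t : List Char), t.length ≤ n → t.getLast? ≠ some '_' →
    (∀ cur : List Char, cur ≠ [] →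
        PySem.Chars.join ['_'] (pvRuns cur t) = cur ++ pvSquash t) ∧
      PySem.Chars.join ['_'] (pvRuns [] t) = pvSquash (t.dropWhile (· = '_')) := by
  intro n
  induction n with
  | zero =>
    intro t h _
    have : t = [] := List.eq_nil_of_length_eq_zero (Nat.le_zero.mp h)
    subst this
    refine ⟨fun cur hc => ?_, by simp [pvRuns, PySem.Chars.join, List.intercalate, pvSquash_nil]⟩
    simp [pvRuns, hc, PySem.Chars.join, List.intercalate, pvSquash_nil]
  | succ n ih =>
    intro t h hlast
    match t with
    | [] =>
      refine ⟨fun cur hc => ?_, by simp [pvRuns, PySem.Chars.join, List.intercalate, pvSquash_nil]⟩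
      simp [pvRuns, hc, PySem.Chars.join, List.intercalate, pvSquash_nil]
    | c :: t' =>
      have ht' : t' ≠ [] → t'.getLast? ≠ some '_' := by
        intro hne
        match t' with
        | d :: u => simpa [List.getLast?_cons_cons] using hlast
      by_cases hc : c = '_'
      · subst hc
        have hne : t' ≠ [] := by
          intro he; subst he; simp at hlast
        have hl' := ht' hne
        have iht := ih t' (by simp at h ⊢; omega) hl'
        have hex : ∃ x ∈ t', x ≠ '_' := by
          have hgl := List.getLast?_eq_some_getLast hne
          refine ⟨t'.getLast hne, List.getLast_mem hne, ?_⟩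
          intro he
          exact hl' (by rw [hgl, he])
        have hruns : pvRuns [] t' ≠ [] := pvRuns_ne_nil t' [] (Or.inr hex)
        constructor
        · intro cur hcur
          have e1 : pvRuns cur ('_' :: t') = cur :: pvRuns [] t' := by
            simp [pvRuns, hcur]
          rw [e1, pvJoin_cons cur (pvRuns [] t') hruns, iht.2]
          simp [pvSquash_cons]
        · have e1 : pvRuns ([] : List Char) ('_' :: t') = pvRuns [] t' := by
            simp [pvRuns]
          rw [e1, List.dropWhile_cons]
          simpa using iht.2
      · have hl'' : t'.getLast? ≠ some '_' := by
          match t' with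
          | [] => simp
          | d :: u => exact ht' (by simp)
        have iht := ih t' (by simp at h ⊢; omega) hl''
        have hK := iht.1
        constructor
        · intro cur hcur
          have e1 : pvRuns cur (c :: t') = pvRuns (cur ++ [c]) t' := by
            simp [pvRuns, hc]
          rw [e1, hK (cur ++ [c]) (by simp)]
          simp [pvSquash_cons, hc]
        · have e1 : pvRuns ([] : List Char) (c :: t') = pvRuns [c] t' := by
            simp [pvRuns, hc]
          rw [e1, hK [c] (by simp), List.dropWhile_cons]
          simp [pvSquash_cons, hc]

theorem pvHead_dropWhile (p : Char → Bool) : ∀ (l : List Char) (c : Char),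
    (l.dropWhile p).head? = some c → p c = false := by
  intro l
  induction l with
  | nil => intro c h; simp at h
  | cons a t ih =>
    intro c h
    by_cases ha : p a
    · rw [List.dropWhile_cons, if_pos ha] at h
      exact ih c h
    · rw [List.dropWhile_cons, if_neg ha] at h
      simp at h
      subst h
      exact Bool.not_eq_true _ ▸ ha

-- main bridge: A's strip+collapse pipeline equals B's run-join, on any char list m
theorem pvMain (m : List Char) :
    pvSquash (PySem.Chars.stripChars m ['_']) = PySem.Chars.join ['_'] (pvRuns [] m) := by
  have hpred : (fun c => (['_'] : List Char).contains c) = (fun c : Char => decide (c = '_')) := by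
    funext c
    by_cases h : c = '_' <;> simp [h]
  have hstrip : PySem.Chars.stripChars m ['_'] =
      ((((m.dropWhile (fun c => decide (c = '_'))).reverse).dropWhile
        (fun c => decide (c = '_'))).reverse) := by
    simp only [PySem.Chars.stripChars, hpred]
  set q : Char → Bool := fun c => decide (c = '_') with hq
  set m1 := m.dropWhile q with hm1
  set tt := ((m1.reverse).dropWhile q).reverse with htt
  set ws := ((m1.reverse).takeWhile q).reverse with hws
  have hdecomp : m1 = tt ++ ws := by
    have := List.takeWhile_append_dropWhile (p := q) (l := m1.reverse)
    calc m1 = m1.reverse.reverse := by simp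
    _ = (m1.reverse.takeWhile q ++ m1.reverse.dropWhile q).reverse := by rw [this]
    _ = tt ++ ws := by rw [List.reverse_append]
  have hws_all : ∀ c ∈ ws, c = '_' := by
    intro c hc
    rw [hws, List.mem_reverse] at hc
    have := List.mem_takeWhile_imp hc
    simpa [hq] using this
  have hlast : tt.getLast? ≠ some '_' := by
    rw [htt, List.getLast?_reverse]
    intro hcon
    have := pvHead_dropWhile q (m1.reverse) '_' hcon
    simp [hq] at this
  have hhead : tt.dropWhile q = tt := by
    match htt' : tt with
    | [] => rfl
    | a :: tt2 =>
      have hh : m1.head? = some a := by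
        rw [hdecomp]; simp
      have hqa := pvHead_dropWhile q m a hh
      rw [List.dropWhile_cons, hqa]
      simp
  have hKM := pvKM tt.length tt le_rfl hlast
  calc pvSquash (PySem.Chars.stripChars m ['_'])
      = pvSquash tt := by rw [hstrip]
    _ = pvSquash (tt.dropWhile q) := by rw [hhead]
    _ = PySem.Chars.join ['_'] (pvRuns [] tt) := by rw [hKM.2]
    _ = PySem.Chars.join ['_'] (pvRuns [] (tt ++ ws)) := by
        rw [pvRuns_append_underscore tt ws hws_all []]
    _ = PySem.Chars.join ['_'] (pvRuns [] m1) := by rw [← hdecomp]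
    _ = PySem.Chars.join ['_'] (pvRuns [] m) := by
        rw [hm1, ← pvRuns_dropWhile m]

-- ===== VERDICT (by name: the statement is the Claim_ definition above) =====
theorem sanitize_token_py_spec : Claim_equal_sanitize_token_py := by
  intro raw _
  unfold Spec_sanitize_token_py sanitize_token_py sanitize_token_py_alt
  show (if sanitize_token_py_collapse
          (PySem.Chars.stripChars (PySem.Chars.join [] (List.foldl (fun out ch =>
        if PySem.Chars.isalnum ch then out ++ [[ch]]
        else if ch = '.' ∨ ch = '-' then out ++ [['_']]
        else out ++ [['_']]) [] (PySem.Chars.lower (PySem.Chars.strip raw.toList)))) ['_']) = []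
        then "goal"
        else String.ofList (sanitize_token_py_collapse
          (PySem.Chars.stripChars (PySem.Chars.join [] (List.foldl (fun out ch =>
        if PySem.Chars.isalnum ch then out ++ [[ch]]
        else if ch = '.' ∨ ch = '-' then out ++ [['_']]
        else out ++ [['_']]) [] (PySem.Chars.lower (PySem.Chars.strip raw.toList)))) ['_'])))
      = (if PySem.Chars.join ['_']
            (if (List.foldl (fun rc ch =>
        if PySem.Chars.isalnum ch then (rc.1, rc.2 ++ [ch])
        else if rc.2 ≠ [] then (rc.1 ++ [rc.2], []) else rc) ([], []) (PySem.Chars.lower (PySem.Chars.strip raw.toList))).2 ≠ [] then (List.foldl (fun rc ch =>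
        if PySem.Chars.isalnum ch then (rc.1, rc.2 ++ [ch])
        else if rc.2 ≠ [] then (rc.1 ++ [rc.2], []) else rc) ([], []) (PySem.Chars.lower (PySem.Chars.strip raw.toList))).1 ++ [(List.foldl (fun rc ch =>
        if PySem.Chars.isalnum ch then (rc.1, rc.2 ++ [ch])
        else if rc.2 ≠ [] then (rc.1 ++ [rc.2], []) else rc) ([], []) (PySem.Chars.lower (PySem.Chars.strip raw.toList))).2] else (List.foldl (fun rc ch =>
        if PySem.Chars.isalnum ch then (rc.1, rc.2 ++ [ch])
        else if rc.2 ≠ [] then (rc.1 ++ [rc.2], []) else rc) ([], []) (PySem.Chars.lower (PySem.Chars.strip raw.toList))).1) = []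
        then "goal"
        else String.ofList (PySem.Chars.join ['_']
            (if (List.foldl (fun rc ch =>
        if PySem.Chars.isalnum ch then (rc.1, rc.2 ++ [ch])
        else if rc.2 ≠ [] then (rc.1 ++ [rc.2], []) else rc) ([], []) (PySem.Chars.lower (PySem.Chars.strip raw.toList))).2 ≠ [] then (List.foldl (fun rc ch =>
        if PySem.Chars.isalnum ch then (rc.1, rc.2 ++ [ch])
        else if rc.2 ≠ [] then (rc.1 ++ [rc.2], []) else rc) ([], []) (PySem.Chars.lower (PySem.Chars.strip raw.toList))).1 ++ [(List.foldl (fun rc ch =>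
        if PySem.Chars.isalnum ch then (rc.1, rc.2 ++ [ch])
        else if rc.2 ≠ [] then (rc.1 ++ [rc.2], []) else rc) ([], []) (PySem.Chars.lower (PySem.Chars.strip raw.toList))).2] else (List.foldl (fun rc ch =>
        if PySem.Chars.isalnum ch then (rc.1, rc.2 ++ [ch])
        else if rc.2 ≠ [] then (rc.1 ++ [rc.2], []) else rc) ([], []) (PySem.Chars.lower (PySem.Chars.strip raw.toList))).1)))
  rw [pvFoldA (PySem.Chars.lower (PySem.Chars.strip raw.toList)) [], List.nil_append]
  have hmap : List.map (fun ch => [pvF ch]) (PySem.Chars.lower (PySem.Chars.strip raw.toList))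
      = List.map (fun c => [c]) (List.map pvF (PySem.Chars.lower (PySem.Chars.strip raw.toList))) := by
    rw [List.map_map]; rfl
  rw [hmap, PySem.Chars.join_nil_singletons,
    pvCollapse_eq_squash (PySem.Chars.stripChars (List.map pvF (PySem.Chars.lower (PySem.Chars.strip raw.toList))) ['_']).length _ le_rfl,
    pvMain]
  have hB := pvFoldB (PySem.Chars.lower (PySem.Chars.strip raw.toList)) [] []
  simp only [List.nil_append] at hB
  rw [hB, pvRunsA_map (PySem.Chars.lower (PySem.Chars.strip raw.toList)) []]
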